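-- pv_equiv track=rewrite | github.com/SushmaKannapiran/tapestry-crochet | Version attemps/4 TB SCRIPT.py | categorize_drugs
-- ===== SOURCE A (Python) =====
-- def categorize_drugs(data):
--     """
--     Separates drugs into three categories based on confidence level.
--     Returns drug-confidence pairs for the client report format.
--
--     - Resistant: "Assoc w R" or "Assoc w R - Interim" confidence
--     - Unknown: "Uncertain significance" or "Indeterminate"
--     - Susceptible: Everything else (shown as "No mutation")
--     """
--     all_drugs = {
--         'rifampicin', 'isoniazid', 'ethambutol', 'pyrazinamide',
--         'moxifloxacin', 'levofloxacin', 'ofloxacin',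
--         'bedaquiline', 'delamanid', 'linezolid', 'streptomycin',
--         'amikacin', 'kanamycin', 'capreomycin', 'clofazimine',
--         'ethionamide', 'para-aminosalicylic_acid', 'cycloserine'
--     }
--
--     # Track the best (highest-ranked) confidence per drug
--     confidence_rank = {
--         'not assoc w r': 0, 'not assoc w r - interim': 0,
--         'uncertain significance': 1, 'indeterminate': 1,
--         'assoc w r - interim': 2, 'assoc w r': 3,
--     }
--
--     drug_best = {}  # drug -> (rank, confidence_string)
--
--     # Check dr_variants
--     for var in data.get('dr_variants', []):
--         for annot in var.get('annotation', []):
--             drug = annot.get('drug', '').lower()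
--             conf = annot.get('confidence', '')
--             if not drug:
--                 continue
--             rank = confidence_rank.get(conf.lower(), 1)
--             if drug not in drug_best or rank > drug_best[drug][0]:
--                 drug_best[drug] = (rank, conf)
--
--     # Check other_variants for unknown
--     for var in data.get('other_variants', []):
--         for annot in var.get('annotation', []):
--             drug = annot.get('drug', '').lower()
--             conf = annot.get('confidence', '')
--             if not drug:
--                 continue
--             rank = confidence_rank.get(conf.lower(), 1)
--             if drug not in drug_best or rank > drug_best[drug][0]:
--                 drug_best[drug] = (rank, conf)
--
--     resistant = []
--     unknown = []
--     susceptible = []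
--
--     for drug in sorted(all_drugs):
--         if drug in drug_best:
--             rank, conf = drug_best[drug]
--             if rank >= 2:  # Assoc w R or Assoc w R - Interim
--                 resistant.append((drug, conf))
--             elif rank == 1:  # Uncertain / Indeterminate
--                 unknown.append((drug, conf))
--             else:  # Not assoc w R
--                 susceptible.append((drug, 'No mutation'))
--         else:
--             susceptible.append((drug, 'No mutation'))
--
--     return {
--         'resistant': resistant,
--         'susceptible': susceptible,
--         'unknown': unknown
--     }
-- ===== SOURCE B (Python) =====
-- def categorize_drugs(data):
--     """
--     Separates drugs into three categories based on confidence level.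
--     Index-free re-implementation: flatten all annotations to (drug, conf)
--     pairs once, then for each drug scan the pairs for its best-ranked
--     confidence and classify it with three comprehensions.
--     """
--     rank_of = {
--         'not assoc w r': 0, 'not assoc w r - interim': 0,
--         'uncertain significance': 1, 'indeterminate': 1,
--         'assoc w r - interim': 2, 'assoc w r': 3,
--     }
--     drugs = [  # the 18 reportable drugs, alphabetically
--         'amikacin', 'bedaquiline', 'capreomycin', 'clofazimine',
--         'cycloserine', 'delamanid', 'ethambutol', 'ethionamide',
--         'isoniazid', 'kanamycin', 'levofloxacin', 'linezolid',
--         'moxifloxacin', 'ofloxacin', 'para-aminosalicylic_acid',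
--         'pyrazinamide', 'rifampicin', 'streptomycin',
--     ]
--     pairs = [(annot.get('drug', '').lower(), annot.get('confidence', ''))
--              for key in ('dr_variants', 'other_variants')
--              for var in data.get(key, [])
--              for annot in var.get('annotation', [])
--              if annot.get('drug', '').lower()]
--
--     def best_for(drug):
--         best = None
--         for d, conf in pairs:
--             if d == drug:
--                 r = rank_of.get(conf.lower(), 1)
--                 if best is None or r > best[0]:
--                     best = (r, conf)
--         return best
--
--     cat = [(d, best_for(d)) for d in drugs]
--     return {
--         'resistant': [(d, b[1]) for d, b in cat
--                       if b is not None and b[0] >= 2],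
--         'susceptible': [(d, 'No mutation') for d, b in cat
--                         if b is None or (b[0] < 2 and b[0] != 1)],
--         'unknown': [(d, b[1]) for d, b in cat
--                     if b is not None and b[0] < 2 and b[0] == 1],
--     }
-- ===== Notes on version B (the rewrite author's own statement) =====
-- stated objective: alternative
-- what changed: Replaces the incremental best-per-drug dictionary with a flatten-once list of (drug, confidence) pairs, a per-drug scan picking the best rank, and three comprehensions in place of the single three-accumulator classification loop.
import Mathlib
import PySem

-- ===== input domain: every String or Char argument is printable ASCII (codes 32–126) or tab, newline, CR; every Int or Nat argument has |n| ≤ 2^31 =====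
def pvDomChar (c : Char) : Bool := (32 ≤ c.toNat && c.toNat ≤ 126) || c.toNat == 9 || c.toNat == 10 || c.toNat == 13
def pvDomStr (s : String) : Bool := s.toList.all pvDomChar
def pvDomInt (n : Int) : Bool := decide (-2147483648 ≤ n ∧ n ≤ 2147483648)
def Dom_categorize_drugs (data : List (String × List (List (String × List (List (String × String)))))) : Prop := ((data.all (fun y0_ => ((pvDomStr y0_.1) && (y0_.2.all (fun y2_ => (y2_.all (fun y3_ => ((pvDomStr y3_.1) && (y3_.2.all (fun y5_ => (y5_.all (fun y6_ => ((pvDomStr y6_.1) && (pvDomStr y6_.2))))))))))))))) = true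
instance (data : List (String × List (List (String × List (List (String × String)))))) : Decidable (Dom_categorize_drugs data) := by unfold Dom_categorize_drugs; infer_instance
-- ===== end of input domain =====

-- B replaces A's incremental best-per-drug dictionary by a flatten-once pair list,
-- a per-drug best scan and three filterMap passes (alternative decomposition, same results).

abbrev PVAnnot := List (String × String)
abbrev PVVar := List (String × List PVAnnot)
abbrev PVData := List (String × List PVVar)
abbrev PVDb := PySem.Dict String (Int × String)

-- ===== PORT A =====
def pvRankA : PySem.Dict String Int := PySem.Dict.ofList
  [("not assoc w r", 0), ("not assoc w r - interim", 0),
   ("uncertain significance", 1), ("indeterminate", 1),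
   ("assoc w r - interim", 2), ("assoc w r", 3)]

def pvAllDrugsA : PySem.Set String := PySem.Set.ofList
  ["rifampicin", "isoniazid", "ethambutol", "pyrazinamide",
   "moxifloxacin", "levofloxacin", "ofloxacin",
   "bedaquiline", "delamanid", "linezolid", "streptomycin",
   "amikacin", "kanamycin", "capreomycin", "clofazimine",
   "ethionamide", "para-aminosalicylic_acid", "cycloserine"]

-- body of A's two identical annotation loops
def pvUpd (db : PVDb) (annot : PVAnnot) : PVDb :=
  let drug := PySem.Str.lower ((PySem.Dict.mk annot).getD "drug" "")
  let conf := (PySem.Dict.mk annot).getD "confidence" ""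
  if drug = "" then db
  else
    let rank := pvRankA.getD (PySem.Str.lower conf) 1
    match db.get? drug with
    | none => db.insert drug (rank, conf)
    | some best => if rank > best.1 then db.insert drug (rank, conf) else db

def categorize_drugs (data : List (String × List (List (String × List (List (String × String)))))) : List (String × List (String × String)) :=
  let fin := (PySem.List.sorted pvAllDrugsA (fun x => x) false).foldl
    (fun (acc : List (String × String) × List (String × String) × List (String × String)) drug =>
      match (((PySem.Dict.mk data).getD "other_variants" []).foldl
               (fun db var => ((PySem.Dict.mk var).getD "annotation" []).foldl pvUpd db)
               (((PySem.Dict.mk data).getD "dr_variants" []).foldl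
                  (fun db var => ((PySem.Dict.mk var).getD "annotation" []).foldl pvUpd db)
                  PySem.Dict.empty)).get? drug with
      | some best =>
        if best.1 ≥ 2 then (acc.1 ++ [(drug, best.2)], acc.2.1, acc.2.2)
        else if best.1 = 1 then (acc.1, acc.2.1 ++ [(drug, best.2)], acc.2.2)
        else (acc.1, acc.2.1, acc.2.2 ++ [(drug, "No mutation")])
      | none => (acc.1, acc.2.1, acc.2.2 ++ [(drug, "No mutation")]))
    ([], [], [])
  [("resistant", fin.1), ("susceptible", fin.2.2), ("unknown", fin.2.1)]

-- ===== PORT B =====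
def pvRankB : PySem.Dict String Int := PySem.Dict.ofList
  [("not assoc w r", 0), ("not assoc w r - interim", 0),
   ("uncertain significance", 1), ("indeterminate", 1),
   ("assoc w r - interim", 2), ("assoc w r", 3)]

def pvDrugsB : List String :=
  ["amikacin", "bedaquiline", "capreomycin", "clofazimine",
   "cycloserine", "delamanid", "ethambutol", "ethionamide",
   "isoniazid", "kanamycin", "levofloxacin", "linezolid",
   "moxifloxacin", "ofloxacin", "para-aminosalicylic_acid",
   "pyrazinamide", "rifampicin", "streptomycin"]

-- one element of B's pair comprehension
def pvExtract (annot : PVAnnot) : Option (String × String) :=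
  let d := PySem.Str.lower ((PySem.Dict.mk annot).getD "drug" "")
  if d = "" then none
  else some (d, (PySem.Dict.mk annot).getD "confidence" "")

def pvPairs (data : PVData) : List (String × String) :=
  ["dr_variants", "other_variants"].flatMap (fun key =>
    ((PySem.Dict.mk data).getD key []).flatMap (fun var =>
      ((PySem.Dict.mk var).getD "annotation" []).filterMap pvExtract))

-- inner update of B's best_for loop
def pvBUpd (best : Option (Int × String)) (p : String × String) : Option (Int × String) :=
  let r := pvRankB.getD (PySem.Str.lower p.2) 1
  match best with
  | none => some (r, p.2)
  | some b => if r > b.1 then some (r, p.2) else best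

def pvBestFor (pairs : List (String × String)) (drug : String) : Option (Int × String) :=
  pairs.foldl (fun best p => if p.1 = drug then pvBUpd best p else best) none

def pvCatR (p : String × Option (Int × String)) : Option (String × String) :=
  match p.2 with
  | some b => if b.1 ≥ 2 then some (p.1, b.2) else none
  | none => none

def pvCatS (p : String × Option (Int × String)) : Option (String × String) :=
  match p.2 with
  | some b => if b.1 < 2 ∧ b.1 ≠ 1 then some (p.1, "No mutation") else none
  | none => some (p.1, "No mutation")

def pvCatU (p : String × Option (Int × String)) : Option (String × String) :=
  match p.2 with
  | some b => if b.1 < 2 ∧ b.1 = 1 then some (p.1, b.2) else none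
  | none => none

def categorize_drugs_alt (data : List (String × List (List (String × List (List (String × String)))))) : List (String × List (String × String)) :=
  let cat := pvDrugsB.map (fun d => (d, pvBestFor (pvPairs data) d))
  [("resistant", cat.filterMap pvCatR),
   ("susceptible", cat.filterMap pvCatS),
   ("unknown", cat.filterMap pvCatU)]

-- ===== PRECONDITION & SPEC =====
def Spec_categorize_drugs (data : List (String × List (List (String × List (List (String × String)))))) (out : List (String × List (String × String))) : Prop := out = categorize_drugs_alt data
instance (data : List (String × List (List (String × List (List (String × String)))))) (out : List (String × List (String × String))) : Decidable (Spec_categorize_drugs data out) := by unfold Spec_categorize_drugs; infer_instance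

-- ===== CLAIM (what is proved, stated in full; the proofs are below) =====
def Claim_equal_categorize_drugs : Prop := ∀ (data : List (String × List (List (String × List (List (String × String)))))), Dom_categorize_drugs data → Spec_categorize_drugs data (categorize_drugs data)

-- ===== LEMMAS AND PROOFS =====

-- A's running-best update phrased on an extracted pair
def pvStep (db : PVDb) (p : String × String) : PVDb :=
  match db.get? p.1 with
  | none => db.insert p.1 (pvRankA.getD (PySem.Str.lower p.2) 1, p.2)
  | some best =>
    if pvRankA.getD (PySem.Str.lower p.2) 1 > best.1 then
      db.insert p.1 (pvRankA.getD (PySem.Str.lower p.2) 1, p.2)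
    else db

lemma pvUpd_eq (db : PVDb) (annot : PVAnnot) :
    pvUpd db annot = (pvExtract annot).elim db (pvStep db) := by
  unfold pvUpd pvExtract pvStep
  by_cases h : PySem.Str.lower ((PySem.Dict.mk annot).getD "drug" "") = "" <;> simp [h]

lemma foldl_flatMap' {α β γ : Type} (l : List α) (g : α → List β) (f : γ → β → γ) (init : γ) :
    (l.flatMap g).foldl f init = l.foldl (fun a x => (g x).foldl f a) init := by
  induction l generalizing init with
  | nil => rfl
  | cons x xs ih => simp [List.flatMap_cons, List.foldl_append, ih]

lemma foldl_filterMap' {α β γ : Type} (l : List α) (e : α → Option β) (f : γ → β → γ) (init : γ) :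
    (l.filterMap e).foldl f init = l.foldl (fun a x => (e x).elim a (f a)) init := by
  induction l generalizing init with
  | nil => rfl
  | cons x xs ih => cases h : e x <;> simp [List.filterMap_cons, h, ih]

lemma step_get (db : PVDb) (p : String × String) (d : String) :
    (pvStep db p).get? d = if p.1 = d then pvBUpd (db.get? d) p else db.get? d := by
  have hrank : pvRankB = pvRankA := rfl
  unfold pvStep pvBUpd
  by_cases h : p.1 = d
  · subst h
    cases hdb : db.get? p.1 with
    | none => simp [hdb, hrank, PySem.Dict.get?_insert_self]
    | some b =>
      simp only [hdb, hrank]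
      split <;> simp [hdb, PySem.Dict.get?_insert_self]
  · rw [if_neg h]
    cases hdb : db.get? p.1 with
    | none => simp only [hdb]; rw [PySem.Dict.get?_insert, if_neg (Ne.symm h)]
    | some b =>
      simp only [hdb]
      split
      · rw [PySem.Dict.get?_insert, if_neg (Ne.symm h)]
      · rfl

lemma foldl_step_get (ps : List (String × String)) (db : PVDb) (d : String) :
    (ps.foldl pvStep db).get? d
      = ps.foldl (fun best p => if p.1 = d then pvBUpd best p else best) (db.get? d) := by
  induction ps generalizing db with
  | nil => rfl
  | cons p ps ih => simp only [List.foldl_cons, ih, step_get]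

lemma vars_fold_eq (vars : List PVVar) (db : PVDb) :
    (vars.flatMap (fun var => ((PySem.Dict.mk var).getD "annotation" []).filterMap pvExtract)).foldl pvStep db
      = vars.foldl (fun db var => ((PySem.Dict.mk var).getD "annotation" []).foldl pvUpd db) db := by
  rw [foldl_flatMap']
  have hfun : (fun (a : PVDb) (var : PVVar) =>
        (((PySem.Dict.mk var).getD "annotation" []).filterMap pvExtract).foldl pvStep a)
      = (fun db var => ((PySem.Dict.mk var).getD "annotation" []).foldl pvUpd db) := by
    funext a var
    rw [foldl_filterMap']
    have h2 : (fun (a : PVDb) (x : PVAnnot) => (pvExtract x).elim a (pvStep a)) = pvUpd := by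
      funext a x
      rw [pvUpd_eq]
    rw [h2]
  rw [hfun]

lemma db_get (data : PVData) (d : String) :
    (((PySem.Dict.mk data).getD "other_variants" []).foldl
        (fun db var => ((PySem.Dict.mk var).getD "annotation" []).foldl pvUpd db)
        (((PySem.Dict.mk data).getD "dr_variants" []).foldl
           (fun db var => ((PySem.Dict.mk var).getD "annotation" []).foldl pvUpd db)
           PySem.Dict.empty)).get? d
      = pvBestFor (pvPairs data) d := by
  have hpairs : pvPairs data
      = ((PySem.Dict.mk data).getD "dr_variants" []).flatMap
          (fun var => ((PySem.Dict.mk var).getD "annotation" []).filterMap pvExtract)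
        ++ ((PySem.Dict.mk data).getD "other_variants" []).flatMap
          (fun var => ((PySem.Dict.mk var).getD "annotation" []).filterMap pvExtract) := by
    simp [pvPairs]
  have : (pvPairs data).foldl pvStep PySem.Dict.empty
      = ((PySem.Dict.mk data).getD "other_variants" []).foldl
          (fun db var => ((PySem.Dict.mk var).getD "annotation" []).foldl pvUpd db)
          (((PySem.Dict.mk data).getD "dr_variants" []).foldl
             (fun db var => ((PySem.Dict.mk var).getD "annotation" []).foldl pvUpd db)
             PySem.Dict.empty) := by
    rw [hpairs, List.foldl_append, vars_fold_eq, vars_fold_eq]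
  rw [← this, foldl_step_get, pvBestFor, PySem.Dict.get?_empty]

lemma sorted_drugs : PySem.List.sorted pvAllDrugsA (fun x => x) false = pvDrugsB := by
  apply PySem.List.sorted_eq_of_perm_of_pairwise_lt
  · decide
  · have hp : (pvDrugsB.map String.toList).Pairwise (· < ·) := by decide
    rw [List.pairwise_map] at hp
    exact hp.imp (fun h => String.lt_iff_toList_lt.mpr h)

lemma classify (best : String → Option (Int × String)) (ds : List String)
    (res unk sus : List (String × String)) :
    ds.foldl (fun acc drug =>
        match best drug with
        | some b =>
          if b.1 ≥ 2 then (acc.1 ++ [(drug, b.2)], acc.2.1, acc.2.2)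
          else if b.1 = 1 then (acc.1, acc.2.1 ++ [(drug, b.2)], acc.2.2)
          else (acc.1, acc.2.1, acc.2.2 ++ [(drug, "No mutation")])
        | none => (acc.1, acc.2.1, acc.2.2 ++ [(drug, "No mutation")])) (res, unk, sus)
      = (res ++ (ds.map (fun d => (d, best d))).filterMap pvCatR,
         unk ++ (ds.map (fun d => (d, best d))).filterMap pvCatU,
         sus ++ (ds.map (fun d => (d, best d))).filterMap pvCatS) := by
  induction ds generalizing res unk sus with
  | nil => simp
  | cons d ds ih =>
    simp only [List.foldl_cons, List.map_cons, List.filterMap_cons]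
    cases h : best d with
    | none => simp [h, pvCatR, pvCatU, pvCatS, ih]
    | some b =>
      obtain ⟨r, c⟩ := b
      by_cases h2 : r ≥ 2
      · have eR : pvCatR (d, some (r, c)) = some (d, c) := by
          simp only [pvCatR]; rw [if_pos h2]
        have eU : pvCatU (d, some (r, c)) = none := by
          simp only [pvCatU]; rw [if_neg (show ¬(r < 2 ∧ r = (1 : Int)) by omega)]
        have eS : pvCatS (d, some (r, c)) = none := by
          simp only [pvCatS]; rw [if_neg (show ¬(r < 2 ∧ r ≠ (1 : Int)) by omega)]
        simp only [List.foldl_cons, List.map_cons, List.filterMap_cons, eR, eU, eS, h]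
        rw [if_pos h2, ih]
        simp only [List.append_assoc, List.singleton_append]
      · by_cases h3 : r = 1
        · have eR : pvCatR (d, some (r, c)) = none := by
            simp only [pvCatR]; rw [if_neg h2]
          have eU : pvCatU (d, some (r, c)) = some (d, c) := by
            simp only [pvCatU]; rw [if_pos (show r < 2 ∧ r = (1 : Int) by omega)]
          have eS : pvCatS (d, some (r, c)) = none := by
            simp only [pvCatS]; rw [if_neg (show ¬(r < 2 ∧ r ≠ (1 : Int)) by omega)]
          simp only [List.foldl_cons, List.map_cons, List.filterMap_cons, eR, eU, eS, h]
          rw [if_neg h2, if_pos h3, ih]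
          simp only [List.append_assoc, List.singleton_append]
        · have eR : pvCatR (d, some (r, c)) = none := by
            simp only [pvCatR]; rw [if_neg h2]
          have eU : pvCatU (d, some (r, c)) = none := by
            simp only [pvCatU]; rw [if_neg (show ¬(r < 2 ∧ r = (1 : Int)) by omega)]
          have eS : pvCatS (d, some (r, c)) = some (d, "No mutation") := by
            simp only [pvCatS]; rw [if_pos (show r < 2 ∧ r ≠ (1 : Int) by omega)]
          simp only [List.foldl_cons, List.map_cons, List.filterMap_cons, eR, eU, eS, h]
          rw [if_neg h2, if_neg h3, ih]
          simp only [List.append_assoc, List.singleton_append]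

-- ===== VERDICT (by name: the statement is the Claim_ definition above) =====
theorem categorize_drugs_spec : Claim_equal_categorize_drugs := by
  intro data _
  unfold Spec_categorize_drugs categorize_drugs categorize_drugs_alt
  have hfun : (fun (acc : List (String × String) × List (String × String) × List (String × String)) (drug : String) =>
      match (((PySem.Dict.mk data).getD "other_variants" []).foldl
               (fun db var => ((PySem.Dict.mk var).getD "annotation" []).foldl pvUpd db)
               (((PySem.Dict.mk data).getD "dr_variants" []).foldl
                  (fun db var => ((PySem.Dict.mk var).getD "annotation" []).foldl pvUpd db)
                  PySem.Dict.empty)).get? drug with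
      | some best =>
        if best.1 ≥ 2 then (acc.1 ++ [(drug, best.2)], acc.2.1, acc.2.2)
        else if best.1 = 1 then (acc.1, acc.2.1 ++ [(drug, best.2)], acc.2.2)
        else (acc.1, acc.2.1, acc.2.2 ++ [(drug, "No mutation")])
      | none => (acc.1, acc.2.1, acc.2.2 ++ [(drug, "No mutation")]))
    = (fun acc drug =>
      match pvBestFor (pvPairs data) drug with
      | some best =>
        if best.1 ≥ 2 then (acc.1 ++ [(drug, best.2)], acc.2.1, acc.2.2)
        else if best.1 = 1 then (acc.1, acc.2.1 ++ [(drug, best.2)], acc.2.2)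
        else (acc.1, acc.2.1, acc.2.2 ++ [(drug, "No mutation")])
      | none => (acc.1, acc.2.1, acc.2.2 ++ [(drug, "No mutation")])) := by
    funext acc drug
    rw [db_get]
  rw [hfun, sorted_drugs, classify (fun d => pvBestFor (pvPairs data) d) pvDrugsB [] [] []]
  simp
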